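-- pv_equiv track=rewrite | github.com/smallest-cock/RL-Custom-Quickchat | example scripts/functions.py | sarcasticText
-- ===== SOURCE A (Python) =====
-- def sarcasticText(str: str) -> str:
--     wordList = str.lower().split(' ')
--     sarcasticWordList = []
--     for word in wordList:
--         newWord = ''
--         for i in range(len(word)):
--             if word[i].lower() == 'i':
--                 newWord += 'i'
--             elif word[i].lower() == 'l':
--                 newWord += 'L'
--             else:
--                 if (i % 2 == 1):
--                     newWord += word[i].upper()
--                 else:
--                     newWord += word[i]
--         sarcasticWordList.append(newWord)
--     return ' '.join(sarcasticWordList)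
-- ===== SOURCE B (Python) =====
-- def sarcasticText(str: str) -> str:
--     # single flat pass: lowercase once, keep a per-word position counter that
--     # resets on every space (split/join of A reconstructed implicitly)
--     out = []
--     k = 0
--     for ch in str.lower():
--         if ch == ' ':
--             out.append(' ')
--             k = 0
--         elif ch == 'i':
--             out.append('i')
--             k += 1
--         elif ch == 'l':
--             out.append('L')
--             k += 1
--         else:
--             out.append(ch.upper() if k % 2 == 1 else ch)
--             k += 1
--     return ''.join(out)
-- ===== Notes on version B (the rewrite author's own statement) =====
-- stated objective: simpler
-- what changed: Replaces split-into-words / per-word indexed loop / join with one flat pass over the lowercased string that keeps a position counter reset at each space; avoiding the intermediate word lists and per-character string concatenation also makes it measurably faster by a constant factor.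
import Mathlib
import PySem

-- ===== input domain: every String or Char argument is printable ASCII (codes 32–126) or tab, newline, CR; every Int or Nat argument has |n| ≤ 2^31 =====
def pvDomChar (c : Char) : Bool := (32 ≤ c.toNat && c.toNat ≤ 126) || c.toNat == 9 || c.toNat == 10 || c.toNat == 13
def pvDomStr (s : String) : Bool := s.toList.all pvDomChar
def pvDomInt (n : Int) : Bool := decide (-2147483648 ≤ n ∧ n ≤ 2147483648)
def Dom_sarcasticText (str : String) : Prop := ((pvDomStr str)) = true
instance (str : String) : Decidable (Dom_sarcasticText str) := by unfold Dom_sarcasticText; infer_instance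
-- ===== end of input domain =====

-- B replaces A's split / per-word indexed loop / join decomposition by one flat pass over the
-- lowercased string with a position counter that resets at each space (objective: simpler).

-- ===== PORT A =====
def sarcasticText (str : String) : String :=
  let wordList := PySem.Chars.splitOn (PySem.Chars.lower str.toList) [' ']
  let sarcasticWordList := wordList.foldl (fun acc word =>
    let newWord := (PySem.List.pyRange 0 (word.length : Int) 1).foldl (fun nw i =>
      let c := PySem.List.pyGetD word i ' '
      if PySem.Chars.lowerChar c = 'i' then nw ++ ['i']
      else if PySem.Chars.lowerChar c = 'l' then nw ++ ['L']
      else if PySem.Int.mod i 2 = 1 then nw ++ [PySem.Chars.upperChar c]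
      else nw ++ [c]) ([] : List Char)
    acc ++ [newWord]) []
  String.ofList (PySem.Chars.join [' '] sarcasticWordList)

-- ===== PORT B =====
def sarcasticText_alt (str : String) : String :=
  let final := (PySem.Chars.lower str.toList).foldl (fun (st : List Char × Nat) ch =>
    if ch = ' ' then (st.1 ++ [' '], 0)
    else if ch = 'i' then (st.1 ++ ['i'], st.2 + 1)
    else if ch = 'l' then (st.1 ++ ['L'], st.2 + 1)
    else if st.2 % 2 = 1 then (st.1 ++ [PySem.Chars.upperChar ch], st.2 + 1)
    else (st.1 ++ [ch], st.2 + 1)) (([] : List Char), (0 : Nat))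
  String.ofList final.1

-- ===== PRECONDITION & SPEC =====
def Spec_sarcasticText (str : String) (out : String) : Prop := out = sarcasticText_alt str
instance (str : String) (out : String) : Decidable (Spec_sarcasticText str out) := by unfold Spec_sarcasticText; infer_instance

-- ===== CLAIM (what is proved, stated in full; the proofs are below) =====
def Claim_equal_sarcasticText : Prop := ∀ (str : String), Dom_sarcasticText str → Spec_sarcasticText str (sarcasticText str)

-- ===== LEMMAS AND PROOFS =====

-- the per-character transformation for an already-lowercased character at word position k
def pvStep (c : Char) (k : Nat) : List Char :=
  if c = 'i' then ['i']
  else if c = 'l' then ['L']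
  else if k % 2 = 1 then [PySem.Chars.upperChar c] else [c]

-- A's inner word loop, as structural recursion carrying the position
def pvWordRec : List Char → Nat → List Char
  | [], _ => []
  | c :: cs, k => pvStep c k ++ pvWordRec cs (k + 1)

-- structural characterisation of Python's split on a single space
def pvSplit : List Char → List (List Char)
  | [] => [[]]
  | c :: rest =>
    if c = ' ' then [] :: pvSplit rest
    else
      match pvSplit rest with
      | [] => [[c]]
      | w :: ws => (c :: w) :: ws

-- A's inner loop body (definitionally the lambda in the port of A)
def pvBodyA (word : List Char) (nw : List Char) (i : Int) : List Char :=
  let c := PySem.List.pyGetD word i ' '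
  if PySem.Chars.lowerChar c = 'i' then nw ++ ['i']
  else if PySem.Chars.lowerChar c = 'l' then nw ++ ['L']
  else if PySem.Int.mod i 2 = 1 then nw ++ [PySem.Chars.upperChar c]
  else nw ++ [c]

-- B's loop body (definitionally the lambda in the port of B)
def pvBodyB (st : List Char × Nat) (ch : Char) : List Char × Nat :=
  if ch = ' ' then (st.1 ++ [' '], 0)
  else if ch = 'i' then (st.1 ++ ['i'], st.2 + 1)
  else if ch = 'l' then (st.1 ++ ['L'], st.2 + 1)
  else if st.2 % 2 = 1 then (st.1 ++ [PySem.Chars.upperChar ch], st.2 + 1)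
  else (st.1 ++ [ch], st.2 + 1)

theorem pvSplit_ne_nil (l : List Char) : pvSplit l ≠ [] := by
  cases l with
  | nil => simp [pvSplit]
  | cons c rest =>
    simp only [pvSplit]
    split_ifs
    · simp
    · cases h : pvSplit rest <;> simp

theorem pv_go_eq (fuel : Nat) : ∀ (l cur : List Char) (acc : List (List Char)),
    l.length < fuel →
    PySem.Chars.splitOn.go [' '] fuel l cur acc
      = acc.reverse ++ (pvSplit l).modifyHead (fun w => cur.reverse ++ w) := by
  induction fuel with
  | zero => intro l cur acc h; omega
  | succ n ih =>
    intro l cur acc h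
    cases l with
    | nil =>
      rw [PySem.Chars.splitOn.go.eq_def]
      simp [pvSplit]
    | cons c rest =>
      have hstep : PySem.Chars.splitOn.go [' '] (n+1) (c :: rest) cur acc
          = if c = ' ' then PySem.Chars.splitOn.go [' '] n rest [] (cur.reverse :: acc)
            else PySem.Chars.splitOn.go [' '] n rest (c :: cur) acc := by
        rw [PySem.Chars.splitOn.go.eq_def]
        by_cases hc : c = ' '
        · simp [List.isPrefixOf, hc]
        · simp only [List.isPrefixOf, List.length]
          simp [hc]
          intro h'; exact absurd h'.symm hc
      rw [hstep]
      have hlen : rest.length < n := by simpa using h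
      by_cases hc : c = ' '
      · rw [if_pos hc, ih rest [] (cur.reverse :: acc) hlen]
        simp [pvSplit, hc]
        cases hs : pvSplit rest with
        | nil => exact absurd hs (pvSplit_ne_nil rest)
        | cons w ws => simp
      · rw [if_neg hc, ih rest (c :: cur) acc hlen]
        simp only [pvSplit, if_neg hc]
        cases hs : pvSplit rest with
        | nil => exact absurd hs (pvSplit_ne_nil rest)
        | cons w ws => simp

theorem pvSplitOn_eq (l : List Char) : PySem.Chars.splitOn l [' '] = pvSplit l := by
  unfold PySem.Chars.splitOn
  rw [pv_go_eq (l.length + 1) l [] [] (by omega)]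
  cases hs : pvSplit l with
  | nil => exact absurd hs (pvSplit_ne_nil l)
  | cons w ws => simp

theorem pvLowerChar_idem (c : Char) :
    PySem.Chars.lowerChar (PySem.Chars.lowerChar c) = PySem.Chars.lowerChar c := by
  unfold PySem.Chars.lowerChar PySem.Chars.isupper
  by_cases h : 'A' ≤ c ∧ c ≤ 'Z'
  · have hA : 65 ≤ c.toNat := by
      have := h.1; rw [Char.le_def] at this; exact this
    have hZ : c.toNat ≤ 90 := by
      have := h.2; rw [Char.le_def] at this; exact this
    have hv : (c.toNat + 32).isValidChar := by
      left; omega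
    have ht : (Char.ofNat (c.toNat + 32)).toNat = c.toNat + 32 := by
      rw [Char.toNat_ofNat, if_pos hv]
    have h2 : ¬ ('A' ≤ Char.ofNat (c.toNat + 32) ∧ Char.ofNat (c.toNat + 32) ≤ 'Z') := by
      rintro ⟨-, h2⟩
      rw [Char.le_def] at h2
      have : (Char.ofNat (c.toNat + 32)).toNat ≤ 90 := h2
      omega
    simp only [h, decide_true, Bool.and_self, if_true]
    rcases not_and_or.mp h2 with h3 | h3 <;> simp [h3]
  · rcases not_and_or.mp h with h3 | h3 <;> simp [h3]

-- A's branch chain on a lowercase-fixed character is pvStep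
theorem pvLower_fix_step (c : Char) (k : Nat) (hc : PySem.Chars.lowerChar c = c) :
    (if PySem.Chars.lowerChar c = 'i' then ['i']
     else if PySem.Chars.lowerChar c = 'l' then ['L']
     else if PySem.Int.mod (k : Int) 2 = 1 then [PySem.Chars.upperChar c]
     else [c]) = pvStep c k := by
  rw [hc]
  have hm : (PySem.Int.mod (k : Int) 2 = 1) ↔ (k % 2 = 1) := by
    unfold PySem.Int.mod
    rw [Int.fmod_eq_emod]
    simp
    omega
  unfold pvStep
  split_ifs with h1 h2 h3 h4 <;> first | rfl | (exact absurd (hm.mp h3) ‹_›) | (exact absurd (hm.mpr ‹_›) h3)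

-- A's indexed word loop equals the structural recursion
theorem pv_afold (w : List Char) (hw : ∀ c ∈ w, PySem.Chars.lowerChar c = c) :
    ∀ (n j : Nat) (nw : List Char), w.length - j = n →
    (PySem.List.pyRange (j : Int) (w.length : Int) 1).foldl (pvBodyA w) nw
      = nw ++ pvWordRec (w.drop j) j := by
  intro n
  induction n with
  | zero =>
    intro j nw hj
    rw [PySem.List.pyRange_one_eq_nil (by omega)]
    rw [List.drop_of_length_le (by omega)]
    simp [pvWordRec]
  | succ m ih =>
    intro j nw hj
    have hjlt : j < w.length := by omega
    rw [PySem.List.pyRange_one_cons (by exact_mod_cast hjlt)]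
    rw [List.foldl_cons]
    have hget : PySem.List.pyGetD w (j : Int) ' ' = w[j] := by
      rw [PySem.List.pyGetD_natCast, List.getD_eq_getElem?_getD, List.getElem?_eq_getElem hjlt]
      rfl
    have hbody : pvBodyA w nw (j : Int) = nw ++ pvStep w[j] j := by
      unfold pvBodyA
      simp only [hget]
      rw [← pvLower_fix_step w[j] j (hw _ (List.getElem_mem hjlt))]
      split_ifs <;> rfl
    rw [hbody]
    have : ((j : Int) + 1) = ((j + 1 : Nat) : Int) := by push_cast; ring
    rw [this, ih (j+1) _ (by omega)]
    rw [List.drop_eq_getElem_cons hjlt]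
    simp [pvWordRec]

-- characters of the words of pvSplit l are characters of l
theorem pvSplit_mem (l : List Char) : ∀ w ∈ pvSplit l, ∀ c ∈ w, c ∈ l := by
  induction l with
  | nil => simp [pvSplit]
  | cons c rest ih =>
    intro w hw d hd
    simp only [pvSplit] at hw
    split_ifs at hw with hc
    · rcases List.mem_cons.mp hw with h | h
      · subst h; simp at hd
      · exact List.mem_cons_of_mem _ (ih w h d hd)
    · cases hs : pvSplit rest with
      | nil => exact absurd hs (pvSplit_ne_nil rest)
      | cons v vs =>
        rw [hs] at hw
        rcases List.mem_cons.mp hw with h | h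
        · subst h
          rcases List.mem_cons.mp hd with h' | h'
          · subst h'; simp
          · exact List.mem_cons_of_mem _ (ih v (by rw [hs]; simp) d h')
        · exact List.mem_cons_of_mem _ (ih w (by rw [hs]; simp [h]) d hd)

theorem pvBodyB_nonspace (out : List Char) (k : Nat) (c : Char) (hc : c ≠ ' ') :
    pvBodyB (out, k) c = (out ++ pvStep c k, k + 1) := by
  unfold pvBodyB pvStep
  split_ifs <;> first | rfl | (exact absurd ‹c = ' '› hc)

-- B's flat loop produces A's word-by-word result
theorem pv_bmain : ∀ (l : List Char) (k : Nat) (out : List Char) (w : List Char)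
    (ws : List (List Char)), pvSplit l = w :: ws →
    (l.foldl pvBodyB (out, k)).1
      = out ++ pvWordRec w k ++ ws.flatMap (fun v => ' ' :: pvWordRec v 0) := by
  intro l
  induction l with
  | nil =>
    intro k out w ws hs
    simp [pvSplit] at hs
    obtain ⟨h1, h2⟩ := hs
    subst h1; subst h2
    simp [pvWordRec]
  | cons c rest ih =>
    intro k out w ws hs
    by_cases hc : c = ' '
    · subst hc
      simp only [pvSplit] at hs
      cases hr : pvSplit rest with
      | nil => exact absurd hr (pvSplit_ne_nil rest)
      | cons v vs =>
        rw [hr] at hs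
        obtain ⟨h1, h2⟩ := List.cons_eq_cons.mp hs
        subst h1; subst h2
        rw [List.foldl_cons]
        have : pvBodyB (out, k) ' ' = (out ++ [' '], 0) := by
          unfold pvBodyB; rw [if_pos rfl]
        rw [this, ih 0 (out ++ [' ']) v vs hr]
        simp [pvWordRec]
    · simp only [pvSplit, if_neg hc] at hs
      cases hr : pvSplit rest with
      | nil => exact absurd hr (pvSplit_ne_nil rest)
      | cons v vs =>
        rw [hr] at hs
        obtain ⟨h1, h2⟩ := List.cons_eq_cons.mp hs
        subst h2
        rw [List.foldl_cons, pvBodyB_nonspace out k c hc, ih (k+1) (out ++ pvStep c k) v vs hr]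
        rw [← h1]
        simp [pvWordRec]

-- ' '.join over mapped words, flatMap form
theorem pv_join_eq (f : List Char → List Char) : ∀ (ws : List (List Char)) (w : List Char),
    PySem.Chars.join [' '] ((w :: ws).map f) = f w ++ ws.flatMap (fun v => ' ' :: f v) := by
  intro ws
  induction ws with
  | nil => intro w; simp [PySem.Chars.join_singleton]
  | cons v vs ih =>
    intro w
    simp only [List.map_cons] at ih ⊢
    rw [PySem.Chars.join_cons_cons, ih v]
    simp

-- ===== VERDICT (by name: the statement is the Claim_ definition above) =====
theorem sarcasticText_spec : Claim_equal_sarcasticText := by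
  intro str _
  unfold Spec_sarcasticText
  have hfix : ∀ c ∈ PySem.Chars.lower str.toList, PySem.Chars.lowerChar c = c := by
    intro c hc
    unfold PySem.Chars.lower at hc
    obtain ⟨d, _, rfl⟩ := List.mem_map.mp hc
    exact pvLowerChar_idem d
  have h0A : sarcasticText str = String.ofList (PySem.Chars.join [' ']
      ((PySem.Chars.splitOn (PySem.Chars.lower str.toList) [' ']).foldl (fun acc word =>
        acc ++ [(PySem.List.pyRange 0 (word.length : Int) 1).foldl (pvBodyA word) []]) [])) := rfl
  have h0B : sarcasticText_alt str
      = String.ofList (((PySem.Chars.lower str.toList).foldl pvBodyB ([], 0)).1) := rfl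
  rw [h0A, h0B, pvSplitOn_eq, PySem.List.foldl_append_singleton_eq_map]
  cases hs : pvSplit (PySem.Chars.lower str.toList) with
  | nil => exact absurd hs (pvSplit_ne_nil _)
  | cons w ws =>
    rw [pv_bmain (PySem.Chars.lower str.toList) 0 [] w ws hs]
    have hmap : (w :: ws).map (fun word =>
        (PySem.List.pyRange 0 (word.length : Int) 1).foldl (pvBodyA word) [])
        = (w :: ws).map (fun v => pvWordRec v 0) := by
      apply List.map_congr_left
      intro v hv
      have hwv : ∀ c ∈ v, PySem.Chars.lowerChar c = c := by
        intro c hc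
        exact hfix c (pvSplit_mem _ v (hs ▸ hv) c hc)
      have := pv_afold v hwv v.length 0 [] (by omega)
      simpa using this
    simp only [List.nil_append]
    rw [hmap, pv_join_eq (fun v => pvWordRec v 0) ws w]
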